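-- pv_equiv track=rewrite | github.com/AsafBenor/final-project | nuxmv_run.py | get_positions_2_cops
-- ===== SOURCE A (Python) =====
-- def get_positions_2_cops(board):
--     cop1_position = None
--     cop2_position = None
--     robber_position = None
--
--     for i, row in enumerate(board):
--         for j, cell in enumerate(row):
--             if cell == 'C1':
--                 cop1_position = (i, j)
--             elif cell == 'C2':
--                 cop2_position = (i, j)
--             elif cell == 'R':
--                 robber_position = (i, j)
--
--     return cop1_position, cop2_position, robber_position
-- ===== SOURCE B (Python) =====
-- def get_positions_2_cops(board):
--     cells = [(cell, (i, j)) for i, row in enumerate(board) for j, cell in enumerate(row)]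
--
--     def find(label):
--         for cell, pos in reversed(cells):
--             if cell == label:
--                 return pos
--         return None
--
--     return find('C1'), find('C2'), find('R')
-- ===== Notes on version B (the rewrite author's own statement) =====
-- stated objective: alternative
-- what changed: Instead of a single accumulator pass with an if/elif chain, B first materialises the flattened coordinate list and then answers each of the three labels by an independent reverse search with early return (first match in reverse = last occurrence).
import Mathlib
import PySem

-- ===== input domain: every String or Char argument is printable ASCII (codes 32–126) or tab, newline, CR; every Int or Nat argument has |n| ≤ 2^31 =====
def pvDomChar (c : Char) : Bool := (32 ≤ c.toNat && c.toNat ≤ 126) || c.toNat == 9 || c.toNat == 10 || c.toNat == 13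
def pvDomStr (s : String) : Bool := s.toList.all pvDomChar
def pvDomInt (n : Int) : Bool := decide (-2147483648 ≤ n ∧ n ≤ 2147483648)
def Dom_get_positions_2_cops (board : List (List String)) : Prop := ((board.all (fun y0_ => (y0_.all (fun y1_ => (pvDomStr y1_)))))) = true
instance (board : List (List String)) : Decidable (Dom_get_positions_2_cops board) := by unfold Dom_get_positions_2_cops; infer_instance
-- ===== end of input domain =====

-- B replaces A's single accumulator pass (three variables + if/elif chain) with a
-- flattened coordinate list searched in reverse once per label (alternative; same cost).


-- ===== PORT A =====
-- literal transliteration of A: three Option variables updated through an if/elif chain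
def get_positions_2_cops (board : List (List String)) : (Option (Int × Int)) × (Option (Int × Int)) × (Option (Int × Int)) :=
  (PySem.List.enumerate board 0).foldl
    (fun st p =>
      (PySem.List.enumerate p.2 0).foldl
        (fun st q =>
          if q.2 == "C1" then (some (p.1, q.1), st.2.1, st.2.2)
          else if q.2 == "C2" then (st.1, some (p.1, q.1), st.2.2)
          else if q.2 == "R" then (st.1, st.2.1, some (p.1, q.1))
          else st)
        st)
    (none, none, none)

-- ===== PORT B =====
-- B's 'find': loop over reversed(cells) with early return (the standard-library search find?)
def pvFindB (cells : List (String × (Int × Int))) (label : String) : Option (Int × Int) :=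
  (cells.reverse.find? (fun cp => cp.1 == label)).map (fun cp => cp.2)

-- literal transliteration of B: flatten the board into (cell, (i, j)) pairs, then
-- answer each label by an independent reverse search
def get_positions_2_cops_alt (board : List (List String)) : (Option (Int × Int)) × (Option (Int × Int)) × (Option (Int × Int)) :=
  let cells : List (String × (Int × Int)) :=
    (PySem.List.enumerate board 0).flatMap
      (fun p => (PySem.List.enumerate p.2 0).map (fun q => (q.2, (p.1, q.1))))
  (pvFindB cells "C1", pvFindB cells "C2", pvFindB cells "R")

-- ===== PRECONDITION & SPEC =====
def Spec_get_positions_2_cops (board : List (List String)) (out : (Option (Int × Int)) × (Option (Int × Int)) × (Option (Int × Int))) : Prop := out = get_positions_2_cops_alt board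
instance (board : List (List String)) (out : (Option (Int × Int)) × (Option (Int × Int)) × (Option (Int × Int))) : Decidable (Spec_get_positions_2_cops board out) := by unfold Spec_get_positions_2_cops; infer_instance

-- ===== CLAIM (what is proved, stated in full; the proofs are below) =====
def Claim_equal_get_positions_2_cops : Prop := ∀ (board : List (List String)), Dom_get_positions_2_cops board → Spec_get_positions_2_cops board (get_positions_2_cops board)

-- ===== LEMMAS AND PROOFS =====

-- A's nested fold is a fold of the same step over the flattened coordinate list
theorem nested_foldl_eq_foldl_flatMap {S : Type}
    (g : S → (String × (Int × Int)) → S) (l : List (Int × List String)) (init : S) :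
    l.foldl
      (fun st p => (PySem.List.enumerate p.2 0).foldl (fun st q => g st (q.2, (p.1, q.1))) st)
      init
    = (l.flatMap (fun p => (PySem.List.enumerate p.2 0).map (fun q => (q.2, (p.1, q.1))))).foldl g init := by
  induction l generalizing init with
  | nil => rfl
  | cons p rest ih =>
    simp only [List.foldl_cons, List.flatMap_cons, List.foldl_append, List.foldl_map]
    exact ih _

-- last-occurrence accumulation over a list = first match of a reverse search
theorem foldl_last_eq_find_reverse (c : String) (l : List (String × (Int × Int)))
    (acc : Option (Int × Int)) :
    l.foldl (fun acc q => if q.1 == c then some q.2 else acc) acc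
    = (match l.reverse.find? (fun cp => cp.1 == c) with
       | some cp => some cp.2
       | none => acc) := by
  induction l generalizing acc with
  | nil => rfl
  | cons q rest ih =>
    simp only [List.foldl_cons, List.reverse_cons, List.find?_append]
    rw [ih]
    cases h : rest.reverse.find? (fun cp => cp.1 == c) with
    | some cp => rfl
    | none =>
      by_cases hq : q.1 == c
      · simp [hq]
      · simp [hq]

-- A's triple fold splits into three independent per-label folds
theorem triple_foldl_split (l : List (String × (Int × Int)))
    (a b r : Option (Int × Int)) :
    l.foldl
      (fun st q =>
        if q.1 == "C1" then (some q.2, st.2.1, st.2.2)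
        else if q.1 == "C2" then (st.1, some q.2, st.2.2)
        else if q.1 == "R" then (st.1, st.2.1, some q.2)
        else st)
      (a, b, r)
    = (l.foldl (fun acc q => if q.1 == "C1" then some q.2 else acc) a,
       l.foldl (fun acc q => if q.1 == "C2" then some q.2 else acc) b,
       l.foldl (fun acc q => if q.1 == "R" then some q.2 else acc) r) := by
  induction l generalizing a b r with
  | nil => rfl
  | cons q rest ih =>
    simp only [List.foldl_cons]
    by_cases h1 : q.1 == "C1"
    · have h2 : ¬ (q.1 == "C2") = true := by simp_all
      have h3 : ¬ (q.1 == "R") = true := by simp_all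
      simp only [h1, if_pos, h2, h3]
      exact ih _ _ _
    · by_cases h2 : q.1 == "C2"
      · have h3 : ¬ (q.1 == "R") = true := by simp_all
        simp only [h1, h2, h3, ite_true]
        exact ih _ _ _
      · by_cases h3 : q.1 == "R"
        · simp only [h1, h2, h3, ite_true]
          exact ih _ _ _
        · simp only [h1, h2, h3]
          exact ih _ _ _

-- (match o | some cp => some cp.2 | none => none) = o.map (·.2)
theorem match_none_eq_map (o : Option (String × (Int × Int))) :
    (match o with
     | some cp => some cp.2
     | (none : Option (String × (Int × Int))) => (none : Option (Int × Int))) = o.map (fun cp => cp.2) := by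
  cases o <;> rfl

-- ===== VERDICT (by name: the statement is the Claim_ definition above) =====
theorem get_positions_2_cops_spec : Claim_equal_get_positions_2_cops := by
  intro board _
  unfold Spec_get_positions_2_cops get_positions_2_cops get_positions_2_cops_alt pvFindB
  rw [nested_foldl_eq_foldl_flatMap
        (fun st (e : String × (Int × Int)) =>
          if e.1 == "C1" then (some e.2, st.2.1, st.2.2)
          else if e.1 == "C2" then (st.1, some e.2, st.2.2)
          else if e.1 == "R" then (st.1, st.2.1, some e.2)
          else st)]
  rw [triple_foldl_split]
  simp only [foldl_last_eq_find_reverse, match_none_eq_map]
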